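-- pv_equiv track=rewrite | github.com/UGUIS8020/uguis-bad | snapshot_ugu_points.py | dedupe_raw_history_by_event_date
-- ===== SOURCE A (Python) =====
-- def dedupe_raw_history_by_event_date(raw_history):
--     by_date = {}
--
--     for h in raw_history:
--         event_date = str(h.get("event_date") or "")[:10]
--         registered_at = str(h.get("registered_at") or "")
--
--         if not event_date:
--             continue
--
--         prev = by_date.get(event_date)
--         if prev is None:
--             by_date[event_date] = h
--             continue
--
--         prev_registered_at = str(prev.get("registered_at") or "")
--
--         # 同じ event_date なら、より新しい registered_at を採用
--         if registered_at > prev_registered_at: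
--             by_date[event_date] = h
--
--     return [by_date[d] for d in sorted(by_date.keys())]
-- ===== SOURCE B (Python) =====
-- def dedupe_raw_history_by_event_date(raw_history):
--     def ed(h):
--         return str(h.get("event_date") or "")[:10]
--
--     def ra(h):
--         return str(h.get("registered_at") or "")
--
--     dates = sorted({ed(h) for h in raw_history if ed(h)})
--     result = []
--     for d in dates:
--         best = None
--         for h in raw_history:
--             if ed(h) == d and (best is None or ra(h) > ra(best)):
--                 best = h
--         result.append(best)
--     return result
-- ===== Notes on version B (the rewrite author's own statement) =====
-- stated objective: alternative
-- what changed: A's single fused dict loop (running winner per date, then sorted keys) is replaced by a dict-free two-phase algorithm: first collect the sorted set of distinct non-empty dates, then for each date do a linear scan of the list keeping the record with the strictly greatest registered_at (first-seen wins ties, matching A's strict >).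
import Mathlib
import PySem

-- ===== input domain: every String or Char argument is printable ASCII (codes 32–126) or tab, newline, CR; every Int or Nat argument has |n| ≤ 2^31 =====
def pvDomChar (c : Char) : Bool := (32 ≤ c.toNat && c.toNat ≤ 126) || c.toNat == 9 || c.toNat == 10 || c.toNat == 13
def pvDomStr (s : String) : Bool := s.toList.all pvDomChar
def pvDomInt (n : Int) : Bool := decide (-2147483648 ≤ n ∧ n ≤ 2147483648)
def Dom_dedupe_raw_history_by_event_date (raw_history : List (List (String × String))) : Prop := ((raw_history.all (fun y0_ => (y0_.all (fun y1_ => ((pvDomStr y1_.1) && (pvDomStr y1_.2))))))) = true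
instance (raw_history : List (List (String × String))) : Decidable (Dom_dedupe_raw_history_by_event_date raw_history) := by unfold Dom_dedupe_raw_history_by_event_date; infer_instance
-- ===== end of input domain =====

-- B replaces A's fused dict loop (running winner per date + sorted keys) by a dict-free
-- two-phase algorithm: sorted set of distinct non-empty dates, then a per-date best scan
-- (alternative decomposition; same result, strict > keeps the first-seen winner on ties).

-- shared field accessors: h.get(k) on the record (first match) and the two derived strings
def pvGet (h : List (String × String)) (k : String) : Option String :=
  (h.find? (fun p => p.1 == k)).map (·.2)

-- str(h.get("event_date") or "")[:10]  ("or" collapses both None and "" to "")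
def pvEd (h : List (String × String)) : String :=
  PySem.Str.slice ((pvGet h "event_date").getD "") none (some 10)

-- str(h.get("registered_at") or "")
def pvRa (h : List (String × String)) : String :=
  (pvGet h "registered_at").getD ""

-- ===== PORT A =====
def pvStepA (d : PySem.Dict String (List (String × String))) (h : List (String × String)) :
    PySem.Dict String (List (String × String)) :=
  let ed := pvEd h
  let ra := pvRa h
  if ed = "" then d
  else
    match d.get? ed with
    | none => d.insert ed h
    | some prev => if pvRa prev < ra then d.insert ed h else d

def dedupe_raw_history_by_event_date (raw_history : List (List (String × String))) :
    List (List (String × String)) :=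
  let by_date := raw_history.foldl pvStepA PySem.Dict.empty
  -- by_date[d] is always present for d in keys; getD [] is never the default branch
  (PySem.List.sorted by_date.keys (fun x => x)).map (fun k => (by_date.get? k).getD [])

-- ===== PORT B =====
-- inner loop of B: 'if ed(h) == d and (best is None or ra(h) > ra(best)): best = h'
def pvBestStep (d : String) (best : Option (List (String × String)))
    (h : List (String × String)) : Option (List (String × String)) :=
  if pvEd h == d && (match best with | none => true | some b => decide (pvRa b < pvRa h))
  then some h else best

def dedupe_raw_history_by_event_date_alt (raw_history : List (List (String × String))) :
    List (List (String × String)) :=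
  let dates := PySem.List.sorted
    (PySem.Set.ofList ((raw_history.map pvEd).filter (fun s => !(s == "")))) (fun x => x)
  -- 'result.append(best)': best is never None for a date drawn from the set; getD [] unreached
  dates.map (fun d => (raw_history.foldl (pvBestStep d) none).getD [])

-- ===== PRECONDITION & SPEC =====
def Spec_dedupe_raw_history_by_event_date (raw_history : List (List (String × String))) (out : List (List (String × String))) : Prop := out = dedupe_raw_history_by_event_date_alt raw_history
instance (raw_history : List (List (String × String))) (out : List (List (String × String))) : Decidable (Spec_dedupe_raw_history_by_event_date raw_history out) := by unfold Spec_dedupe_raw_history_by_event_date; infer_instance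

-- ===== CLAIM (what is proved, stated in full; the proofs are below) =====
def Claim_equal_dedupe_raw_history_by_event_date : Prop := ∀ (raw_history : List (List (String × String))), Dom_dedupe_raw_history_by_event_date raw_history → Spec_dedupe_raw_history_by_event_date raw_history (dedupe_raw_history_by_event_date raw_history)

-- ===== LEMMAS AND PROOFS =====

-- A's key set evolves exactly like B's set of non-empty dates
lemma pvKeysA (l : List (List (String × String))) (d : PySem.Dict String (List (String × String)))
    (s : List String) (hk : d.keys = s) :
    (l.foldl pvStepA d).keys =
      ((l.map pvEd).filter (fun x => !(x == ""))).foldl PySem.Set.add s := by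
  induction l generalizing d s with
  | nil => simpa using hk
  | cons h t ih =>
    by_cases hed : pvEd h = ""
    · simp only [List.foldl_cons, List.map_cons, List.filter_cons, hed]
      simpa [pvStepA, hed] using ih d s hk
    · have hstep : (pvStepA d h).keys = PySem.Set.add s (pvEd h) := by
        simp only [pvStepA, if_neg hed]
        cases hg : d.get? (pvEd h) with
        | none =>
          have hc : d.contains (pvEd h) = false :=
            (PySem.Dict.get?_eq_none_iff_contains d (pvEd h)).mp hg
          have hns : pvEd h ∉ s := by
            rw [← hk]
            intro hm
            exact absurd ((PySem.Dict.contains_iff_mem_keys d (pvEd h)).mpr hm) (by simp [hc])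
          dsimp only
          rw [PySem.Dict.keys_insert_of_not_contains d h hc, hk]
          simp [PySem.Set.add, PySem.Set.contains, hns]
        | some prev =>
          have hc : d.contains (pvEd h) = true := by
            rw [PySem.Dict.contains_eq_isSome_get?, hg]; rfl
          have hmem : pvEd h ∈ s := hk ▸ (PySem.Dict.contains_iff_mem_keys d (pvEd h)).mp hc
          have hadd : PySem.Set.add s (pvEd h) = s := by
            simp [PySem.Set.add, PySem.Set.contains, hmem]
          dsimp only
          by_cases hlt : pvRa prev < pvRa h
          · rw [if_pos hlt, PySem.Dict.keys_insert_of_contains d h hc, hk, hadd]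
          · rw [if_neg hlt, hk, hadd]
      simp only [List.foldl_cons, List.map_cons, List.filter_cons]
      have hb : (!((pvEd h) == "")) = true := by simpa using hed
      rw [hb]
      exact ih (pvStepA d h) (PySem.Set.add s (pvEd h)) hstep

-- A's remembered winner at a non-empty key k is B's running best for date k
lemma pvGetA (l : List (List (String × String))) (k : String) (hk : k ≠ "")
    (d : PySem.Dict String (List (String × String))) (best : Option (List (String × String)))
    (hb : d.get? k = best) :
    (l.foldl pvStepA d).get? k = l.foldl (pvBestStep k) best := by
  induction l generalizing d best with
  | nil => simpa using hb
  | cons h t ih =>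
    simp only [List.foldl_cons]
    apply ih
    by_cases hed : pvEd h = ""
    · simp only [pvStepA, pvBestStep, hed]
      simp [hb]
      exact fun e => absurd e hk
    · by_cases hkk : k = pvEd h
      · subst hkk
        cases hg : d.get? (pvEd h) with
        | none =>
          rw [hg] at hb
          simp [pvStepA, pvBestStep, hed, hg, ← hb, PySem.Dict.get?_insert_self]
        | some prev =>
          rw [hg] at hb
          by_cases hlt : pvRa prev < pvRa h
          · simp [pvStepA, pvBestStep, hed, hg, ← hb, hlt, PySem.Dict.get?_insert_self]
          · simp [pvStepA, pvBestStep, hed, hg, ← hb, hlt]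
      · have hne : pvEd h ≠ k := fun e => hkk e.symm
        have hB : pvBestStep k best h = best := by
          simp [pvBestStep, hne]
        rw [hB, ← hb]
        simp only [pvStepA, if_neg hed]
        cases hg : d.get? (pvEd h) with
        | none =>
          dsimp only
          exact PySem.Dict.get?_insert_of_ne d h hkk
        | some prev =>
          dsimp only
          by_cases hlt : pvRa prev < pvRa h
          · rw [if_pos hlt]; exact PySem.Dict.get?_insert_of_ne d h hkk
          · rw [if_neg hlt]

-- ===== VERDICT (by name: the statement is the Claim_ definition above) =====
theorem dedupe_raw_history_by_event_date_spec : Claim_equal_dedupe_raw_history_by_event_date := by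
  intro raw_history _
  unfold Spec_dedupe_raw_history_by_event_date
  unfold dedupe_raw_history_by_event_date dedupe_raw_history_by_event_date_alt
  dsimp only
  have hkeys : (raw_history.foldl pvStepA PySem.Dict.empty).keys =
      PySem.Set.ofList ((raw_history.map pvEd).filter (fun s => !(s == ""))) := by
    rw [pvKeysA raw_history PySem.Dict.empty [] (PySem.Dict.keys_empty)]
    rfl
  rw [hkeys]
  apply List.map_congr_left
  intro k hkmem
  have hkset : k ∈ PySem.Set.ofList ((raw_history.map pvEd).filter (fun s => !(s == ""))) :=
    (PySem.List.mem_sorted _ _ _ _).mp hkmem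
  have hkf : k ∈ (raw_history.map pvEd).filter (fun s => !(s == "")) :=
    (PySem.Set.mem_ofList _ _).mp hkset
  have hk : k ≠ "" := by
    have := List.of_mem_filter hkf
    simpa using this
  rw [pvGetA raw_history k hk PySem.Dict.empty none (PySem.Dict.get?_empty k)]
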